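-- pv_equiv track=rewrite | github.com/J0hnFFFF/chrome_cve | src/browser/plugins/verifiers/d8_verifier.py | _extract_asan_report
-- ===== SOURCE A (Python) =====
-- def _extract_asan_report(stderr: str) -> str:
--     """Extract ASAN report."""
--     if "AddressSanitizer" not in stderr:
--         return ""
--
--     lines = stderr.split('\n')
--     asan_lines = []
--     in_asan = False
--
--     for line in lines:
--         if "AddressSanitizer" in line:
--             in_asan = True
--         if in_asan:
--             asan_lines.append(line)
--         if in_asan and "SUMMARY" in line:
--             break
--
--     return '\n'.join(asan_lines)
-- ===== SOURCE B (Python) =====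
-- def _extract_asan_report(stderr: str) -> str:
--     """Extract ASAN report."""
--     lines = stderr.split('\n')
--     starts = [i for i, line in enumerate(lines) if "AddressSanitizer" in line]
--     if not starts:
--         return ""
--     tail = lines[starts[0]:]
--     ends = [i for i, line in enumerate(tail) if "SUMMARY" in line]
--     if not ends:
--         return '\n'.join(tail)
--     return '\n'.join(tail[:ends[0] + 1])
-- ===== Notes on version B (the rewrite author's own statement) =====
-- stated objective: alternative
-- what changed: Replaces the stateful flag-and-break accumulator loop by index computation: comprehensions over enumerate(lines) find the first AddressSanitizer line and the first SUMMARY line, and the block is cut out with two slices.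
import Mathlib
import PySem

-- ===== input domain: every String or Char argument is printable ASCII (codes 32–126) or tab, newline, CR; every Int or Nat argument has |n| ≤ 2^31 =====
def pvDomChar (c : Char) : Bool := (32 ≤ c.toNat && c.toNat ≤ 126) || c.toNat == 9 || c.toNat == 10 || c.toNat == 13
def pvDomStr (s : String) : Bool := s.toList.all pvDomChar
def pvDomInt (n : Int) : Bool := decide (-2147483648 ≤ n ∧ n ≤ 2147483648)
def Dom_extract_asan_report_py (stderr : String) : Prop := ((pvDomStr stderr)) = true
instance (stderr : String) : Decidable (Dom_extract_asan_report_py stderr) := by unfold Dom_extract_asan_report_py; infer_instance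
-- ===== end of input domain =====

-- B replaces A's flag-and-break accumulator loop by enumerate-comprehensions that compute the
-- two cut indices and slice the block out; same O(n) cost, different decomposition (alternative).

-- ===== PORT A =====
-- A's for-loop: state = (asan_lines, in_asan); break on the first SUMMARY line once in_asan
def asanLoopA : List (List Char) → List (List Char) → Bool → List (List Char)
  | [], asan_lines, _ => asan_lines
  | line :: rest, asan_lines, in_asan =>
    let in_asan := if PySem.Chars.isIn "AddressSanitizer".toList line then true else in_asan
    let asan_lines := if in_asan then asan_lines ++ [line] else asan_lines
    if in_asan && PySem.Chars.isIn "SUMMARY".toList line then asan_lines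
    else asanLoopA rest asan_lines in_asan

def extract_asan_report_py (stderr : String) : String :=
  if PySem.Str.isIn "AddressSanitizer" stderr = false then ""
  else
    String.ofList (PySem.Chars.join ['\n']
      (asanLoopA (PySem.Chars.splitOn stderr.toList ['\n']) [] false))

-- ===== PORT B =====
def extract_asan_report_py_alt (stderr : String) : String :=
  let lines := PySem.Chars.splitOn stderr.toList ['\n']
  let starts := ((PySem.List.enumerate lines 0).filter
      (fun p => PySem.Chars.isIn "AddressSanitizer".toList p.2)).map (fun p => p.1)
  match starts with
  | [] => ""
  | i :: _ =>
    let tail := PySem.List.slice lines (some i) none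
    let ends := ((PySem.List.enumerate tail 0).filter
        (fun p => PySem.Chars.isIn "SUMMARY".toList p.2)).map (fun p => p.1)
    match ends with
    | [] => String.ofList (PySem.Chars.join ['\n'] tail)
    | j :: _ => String.ofList (PySem.Chars.join ['\n'] (PySem.List.slice tail none (some (j + 1))))

-- ===== PRECONDITION & SPEC =====
def Spec_extract_asan_report_py (stderr : String) (out : String) : Prop := out = extract_asan_report_py_alt stderr
instance (stderr : String) (out : String) : Decidable (Spec_extract_asan_report_py stderr out) := by unfold Spec_extract_asan_report_py; infer_instance

-- ===== CLAIM (what is proved, stated in full; the proofs are below) =====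
def Claim_equal_extract_asan_report_py : Prop := ∀ (stderr : String), Dom_extract_asan_report_py stderr → Spec_extract_asan_report_py stderr (extract_asan_report_py stderr)

-- ===== LEMMAS AND PROOFS =====

-- structural version of str.split('\n')
def splitNl : List Char → List (List Char)
  | [] => [[]]
  | c :: rest =>
    if c = '\n' then [] :: splitNl rest
    else
      match splitNl rest with
      | [] => [[c]]
      | p :: ps => (c :: p) :: ps

theorem splitNl_ne_nil (L : List Char) : splitNl L ≠ [] := by
  cases L with
  | nil => simp [splitNl]
  | cons c rest =>
    simp only [splitNl]
    split
    · simp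
    · split <;> simp

-- prepend to the head piece (state of splitOn.go's current-piece accumulator)
def consHead (c : List Char) : List (List Char) → List (List Char)
  | [] => [c]
  | p :: ps => (c ++ p) :: ps

theorem go_eq (fuel : Nat) : ∀ (l cur : List Char) (acc : List (List Char)), l.length ≤ fuel →
    PySem.Chars.splitOn.go ['\n'] fuel l cur acc =
      acc.reverse ++ consHead cur.reverse (splitNl l) := by
  induction fuel with
  | zero =>
    intro l cur acc h
    have : l = [] := List.eq_nil_of_length_eq_zero (Nat.le_zero.mp h)
    subst this
    simp [PySem.Chars.splitOn.go, splitNl, consHead]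
  | succ f ih =>
    intro l cur acc h
    cases l with
    | nil => simp [PySem.Chars.splitOn.go, splitNl, consHead]
    | cons c rest =>
      rw [PySem.Chars.splitOn.go]
      by_cases hc : c = '\n'
      · subst hc
        have hp : List.isPrefixOf ['\n'] ('\n' :: rest) = true := by
          simp [List.isPrefixOf]
        rw [if_pos hp]
        simp only [List.length_cons] at h
        rw [ih _ _ _ (by simpa using Nat.le_of_succ_le_succ h)]
        rcases hsp : splitNl rest with _ | ⟨p, ps⟩
        · exact absurd hsp (splitNl_ne_nil rest)
        · simp [splitNl, hsp, consHead]
      · have hp : List.isPrefixOf ['\n'] (c :: rest) = false := by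
          simp only [List.isPrefixOf, Bool.and_eq_false_iff]
          left
          simpa using Ne.symm hc
        rw [if_neg (by simp [hp])]
        simp only [List.length_cons] at h
        rw [ih _ _ _ (Nat.le_of_succ_le_succ h)]
        rcases hsp : splitNl rest with _ | ⟨p, ps⟩
        · exact absurd hsp (splitNl_ne_nil rest)
        · simp [splitNl, hsp, consHead, hc]

theorem splitOn_eq_splitNl (L : List Char) :
    PySem.Chars.splitOn L ['\n'] = splitNl L := by
  rw [PySem.Chars.splitOn, go_eq _ _ _ _ (by omega)]
  rcases hsp : splitNl L with _ | ⟨p, ps⟩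
  · exact absurd hsp (splitNl_ne_nil L)
  · simp [consHead]

theorem head_splitNl_prefix : ∀ (L : List Char) (p : List Char) (ps : List (List Char)),
    splitNl L = p :: ps → p <+: L := by
  intro L
  induction L with
  | nil => intro p ps h; simp [splitNl] at h; simp [h.1]
  | cons c rest ih =>
    intro p ps h
    by_cases hc : c = '\n'
    · subst hc
      simp [splitNl] at h
      simp [h.1]
    · simp only [splitNl, if_neg hc] at h
      rcases hsp : splitNl rest with _ | ⟨q, qs⟩
      · exact absurd hsp (splitNl_ne_nil rest)
      · rw [hsp] at h
        obtain ⟨h1, h2⟩ := List.cons.inj h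
        subst h1
        exact List.cons_prefix_cons.mpr ⟨rfl, ih q qs hsp⟩

theorem mem_splitNl_infix : ∀ (L p : List Char), p ∈ splitNl L → p <:+: L := by
  intro L
  induction L with
  | nil => intro p h; simp [splitNl] at h; simp [h]
  | cons c rest ih =>
    intro p h
    by_cases hc : c = '\n'
    · subst hc
      simp [splitNl] at h
      rcases h with h | h
      · simp [h]
      · exact (ih p h).trans (List.infix_cons (List.infix_refl rest))
    · simp only [splitNl, if_neg hc] at h
      rcases hsp : splitNl rest with _ | ⟨q, qs⟩
      · exact absurd hsp (splitNl_ne_nil rest)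
      · rw [hsp] at h
        rcases List.mem_cons.mp h with h1 | h1
        · subst h1
          exact (List.cons_prefix_cons.mpr ⟨rfl, head_splitNl_prefix rest q qs hsp⟩).isInfix
        · exact (ih p (hsp ▸ List.mem_cons_of_mem q h1)).trans (List.infix_cons (List.infix_refl rest))

-- head of the comprehension [i for i, line in enumerate(xs, s) if f(line)]
theorem headFilt {α : Type} (f : α → Bool) :
    ∀ (xs : List α) (s : Int),
      ((((PySem.List.enumerate xs s).filter (fun p => f p.2)).map (fun p => p.1)).head?) =
        (List.findIdx? f xs).map (fun (k : Nat) => s + (k : Int)) := by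
  intro xs
  induction xs with
  | nil => intro s; simp [PySem.List.enumerate_nil]
  | cons x rest ih =>
    intro s
    rw [PySem.List.enumerate_cons, List.findIdx?_cons]
    by_cases hf : f x
    · simp [hf]
    · simp only [List.filter_cons]
      simp only [hf]
      rw [if_neg (by simp)]
      rw [ih (s + 1)]
      cases h : List.findIdx? f rest <;> simp
      omega

-- once the flag is set, A appends every line and breaks on the first SUMMARY line
theorem asanLoopA_true (lines : List (List Char)) :
    ∀ acc, asanLoopA lines acc true =
      acc ++ (match List.findIdx? (fun l => PySem.Chars.isIn "SUMMARY".toList l) lines with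
              | none => lines
              | some j => lines.take (j + 1)) := by
  induction lines with
  | nil => intro acc; simp [asanLoopA]
  | cons line rest ih =>
    intro acc
    rw [List.findIdx?_cons, asanLoopA]
    simp only [ite_self, Bool.true_and]
    by_cases hs : PySem.Chars.isIn "SUMMARY".toList line
    · rw [hs, if_pos rfl]
      simp
    · rw [eq_false_of_ne_true hs, if_neg (by simp)]
      simp only [if_pos trivial]
      rw [ih (acc ++ [line])]
      cases h : List.findIdx? (fun l => PySem.Chars.isIn "SUMMARY".toList l) rest <;>
        simp [List.append_assoc]

-- A's whole loop, characterised by the two first-index searches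
theorem asanLoopA_false (lines : List (List Char)) :
    asanLoopA lines [] false =
      (match List.findIdx? (fun l => PySem.Chars.isIn "AddressSanitizer".toList l) lines with
       | none => []
       | some i =>
         (match List.findIdx? (fun l => PySem.Chars.isIn "SUMMARY".toList l) (lines.drop i) with
          | none => lines.drop i
          | some j => (lines.drop i).take (j + 1))) := by
  induction lines with
  | nil => simp [asanLoopA]
  | cons line rest ih =>
    rw [List.findIdx?_cons, asanLoopA]
    by_cases ha : PySem.Chars.isIn "AddressSanitizer".toList line
    · rw [ha]
      simp only [List.nil_append]
      by_cases hs : PySem.Chars.isIn "SUMMARY".toList line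
      · rw [hs]
        simp only [Bool.true_and, if_pos trivial]
        rw [List.drop_zero, List.findIdx?_cons, hs]
        simp
      · rw [eq_false_of_ne_true hs, if_neg (by simp)]
        simp only [if_pos trivial]
        rw [asanLoopA_true rest [line]]
        simp only [List.drop_zero, List.findIdx?_cons, eq_false_of_ne_true hs]
        cases h : List.findIdx? (fun l => PySem.Chars.isIn "SUMMARY".toList l) rest <;> simp
    · rw [eq_false_of_ne_true ha]
      simp only [if_neg (by simp : ¬ (false = true)), Bool.false_and]
      rw [ih]
      cases h : List.findIdx? (fun l => PySem.Chars.isIn "AddressSanitizer".toList l) rest <;> simp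

-- if some line of the split contains a pattern, the pattern is in the whole string
theorem findIdx?_isIn_of_some (L : List Char) (sub : List Char) (k : Nat)
    (h : List.findIdx? (fun l => PySem.Chars.isIn sub l) (splitNl L) = some k) :
    PySem.Chars.isIn sub L = true := by
  obtain ⟨h1, h2⟩ := List.findIdx?_eq_some_iff_findIdx_eq.mp h
  subst h2
  have hmem := List.getElem_mem h1
  have hf : PySem.Chars.isIn sub ((splitNl L)[List.findIdx (fun l => PySem.Chars.isIn sub l) (splitNl L)]) = true :=
    List.findIdx_getElem
  have hinf : sub <:+: L :=
    ((PySem.Chars.isIn_iff_infix _ _).mp hf).trans (mem_splitNl_infix L _ hmem)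
  exact (PySem.Chars.isIn_iff_infix _ _).mpr hinf

-- ===== VERDICT (by name: the statement is the Claim_ definition above) =====
theorem extract_asan_report_py_spec : Claim_equal_extract_asan_report_py := by
  intro stderr _
  unfold Spec_extract_asan_report_py extract_asan_report_py extract_asan_report_py_alt
  dsimp only
  rw [splitOn_eq_splitNl]
  have hstart := headFilt (fun l => PySem.Chars.isIn "AddressSanitizer".toList l)
    (splitNl stderr.toList) 0
  cases hI : List.findIdx? (fun l => PySem.Chars.isIn "AddressSanitizer".toList l)
      (splitNl stderr.toList) with
  | none =>
    rw [hI] at hstart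
    simp only [Option.map_none] at hstart
    rw [List.head?_eq_none_iff.mp hstart]
    split
    · rfl
    · rw [asanLoopA_false, hI]
      rfl
  | some k =>
    have hin : PySem.Str.isIn "AddressSanitizer" stderr = true := by
      rw [PySem.Str.isIn_iff_infix _ _]
      exact (PySem.Chars.isIn_iff_infix _ _).mp (findIdx?_isIn_of_some _ _ _ hI)
    rw [hin, if_neg (by simp)]
    rw [hI] at hstart
    simp only [Option.map_some] at hstart
    cases hst : ((PySem.List.enumerate (splitNl stderr.toList) 0).filter
        (fun p => PySem.Chars.isIn "AddressSanitizer".toList p.2)).map (fun p => p.1) with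
    | nil => rw [hst] at hstart; simp at hstart
    | cons i t =>
      rw [hst] at hstart
      simp only [List.head?_cons, Option.some.injEq] at hstart
      have hi : i = (k : Int) := by omega
      subst hi
      dsimp only
      rw [PySem.List.slice_from_natCast]
      rw [asanLoopA_false, hI]
      have hend := headFilt (fun l => PySem.Chars.isIn "SUMMARY".toList l)
        ((splitNl stderr.toList).drop k) 0
      cases hJ : List.findIdx? (fun l => PySem.Chars.isIn "SUMMARY".toList l)
          ((splitNl stderr.toList).drop k) with
      | none =>
        rw [hJ] at hend
        simp only [Option.map_none] at hend
        rw [List.head?_eq_none_iff.mp hend]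
        dsimp only
        rw [hJ]
      | some k' =>
        rw [hJ] at hend
        simp only [Option.map_some] at hend
        cases hen : ((PySem.List.enumerate ((splitNl stderr.toList).drop k) 0).filter
            (fun p => PySem.Chars.isIn "SUMMARY".toList p.2)).map (fun p => p.1) with
        | nil => rw [hen] at hend; simp at hend
        | cons j t' =>
          rw [hen] at hend
          simp only [List.head?_cons, Option.some.injEq] at hend
          dsimp only
          have hj : j + 1 = ((k' + 1 : Nat) : Int) := by push_cast; omega
          rw [hj, PySem.List.slice_to_natCast]
          rw [hJ]
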